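-- pv_equiv track=rewrite | github.com/Phantom1911/leetcode | interviewBit/Perfect Peak of Array.py | perfectPeak
-- ===== SOURCE A (Python) =====
-- def perfectPeak(A):
--     n = len(A)
--     maxi = [None] * n
--     maxi[0] = A[0]
--
--     mini = [None] * n
--     mini[n - 1] = A[n - 1]
--     # create maxi and mini
--     for i in range(1, n):
--         maxi[i] = max(maxi[i - 1], A[i])
--
--     for i in range(n - 2, -1, -1):
--         mini[i] = min(mini[i + 1], A[i])
--
--     # now traverse the array
--     # if A[i] > maxi[i-1] and A[i] < mini[i+1] then its the ans
--     for i in range(1, n - 1):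
--         if A[i] > maxi[i - 1] and A[i] < mini[i + 1]:
--             return 1
--
--     return 0
-- ===== SOURCE B (Python) =====
-- def perfectPeak(A):
--     n = len(A)
--     running_max = A[0]
--     candidate = None
--     for i in range(1, n - 1):
--         x = A[i]
--         if candidate is not None and x <= candidate:
--             candidate = None
--         if candidate is None and x > running_max:
--             candidate = x
--         running_max = max(running_max, x)
--     if candidate is not None and candidate < A[n - 1]:
--         return 1
--     return 0
-- ===== Notes on version B (the rewrite author's own statement) =====
-- stated objective: faster
-- what changed: Replaced the three-pass array algorithm (prefix-max array, suffix-min array, scan) by a single forward pass with O(1) extra space: it keeps a running max and one candidate peak value, invalidating the candidate as soon as a later element is <= it (the minimal surviving left-peak always suffices), then checks the candidate against the last element.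
import Mathlib
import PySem

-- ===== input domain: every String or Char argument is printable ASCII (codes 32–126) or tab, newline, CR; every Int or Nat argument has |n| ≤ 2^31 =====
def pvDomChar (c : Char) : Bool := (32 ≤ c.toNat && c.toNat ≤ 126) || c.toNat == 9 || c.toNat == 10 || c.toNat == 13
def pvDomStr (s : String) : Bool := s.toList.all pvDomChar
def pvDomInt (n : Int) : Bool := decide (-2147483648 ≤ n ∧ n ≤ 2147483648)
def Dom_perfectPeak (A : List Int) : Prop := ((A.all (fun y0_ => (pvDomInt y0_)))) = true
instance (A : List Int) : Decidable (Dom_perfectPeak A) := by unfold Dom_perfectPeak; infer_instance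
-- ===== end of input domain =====

-- B replaces A's three passes and two auxiliary arrays by ONE forward pass with O(1) extra
-- state (running max + one candidate peak, invalidated by any later element ≤ it) — same O(n)
-- time, constant-factor faster in a timing run; return values proved equal on nonempty lists.

-- ===== PORT A =====
-- third loop of A: early return 1 on the first perfect peak, else 0
def pvScanA (A maxi mini : List Int) : List Int → Int
  | [] => 0
  | i :: rest =>
    if PySem.List.pyGetD A i 0 > PySem.List.pyGetD maxi (i - 1) 0 ∧
       PySem.List.pyGetD A i 0 < PySem.List.pyGetD mini (i + 1) 0 then 1
    else pvScanA A maxi mini rest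

def perfectPeak (A : List Int) : Int :=
  let n : Int := A.length
  -- maxi[0] = A[0]; for i in range(1, n): maxi[i] = max(maxi[i-1], A[i])  (cells written left to right)
  let maxi : List Int :=
    (PySem.List.pyRange 1 n 1).foldl
      (fun m i => m ++ [max (PySem.List.pyGetD m (i - 1) 0) (PySem.List.pyGetD A i 0)])
      [PySem.List.pyGetD A 0 0]
  -- mini[n-1] = A[n-1]; for i in range(n-2, -1, -1): mini[i] = min(mini[i+1], A[i])  (cells written right to left)
  let mini : List Int :=
    (PySem.List.pyRange (n - 2) (-1) (-1)).foldl
      (fun m i => (min (PySem.List.pyGetD m 0 0) (PySem.List.pyGetD A i 0)) :: m)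
      [PySem.List.pyGetD A (n - 1) 0]
  pvScanA A maxi mini (PySem.List.pyRange 1 (n - 1) 1)

-- ===== PORT B =====
-- one iteration of B's single loop: state = (running_max, candidate)
def pvStepB (A : List Int) (st : Int × Option Int) (i : Int) : Int × Option Int :=
  let x := PySem.List.pyGetD A i 0
  -- if candidate is not None and x <= candidate: candidate = None
  let cand : Option Int :=
    match st.2 with
    | some c => if x ≤ c then none else some c
    | none => none
  -- if candidate is None and x > running_max: candidate = x
  let cand2 : Option Int :=
    match cand with
    | none => if st.1 < x then some x else none
    | some c => some c
  (max st.1 x, cand2)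

def perfectPeak_alt (A : List Int) : Int :=
  let n : Int := A.length
  let st := (PySem.List.pyRange 1 (n - 1) 1).foldl (pvStepB A) (PySem.List.pyGetD A 0 0, none)
  match st.2 with
  | some c => if c < PySem.List.pyGetD A (n - 1) 0 then 1 else 0
  | none => 0

-- ===== PRECONDITION & SPEC =====
-- Pre_ excludes only the empty list, on which both Pythons raise IndexError (A[0] / A[n-1]).
def Pre_perfectPeak (A : List Int) : Prop := A ≠ []
instance (A : List Int) : Decidable (Pre_perfectPeak A) := by unfold Pre_perfectPeak; infer_instance
def pvWitness_perfectPeak : List Int := [1, 3, 2]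

def Spec_perfectPeak (A : List Int) (out : Int) : Prop := out = perfectPeak_alt A
instance (A : List Int) (out : Int) : Decidable (Spec_perfectPeak A out) := by unfold Spec_perfectPeak; infer_instance

-- ===== CLAIM (what is proved, stated in full; the proofs are below) =====
def Claim_equal_perfectPeak : Prop := ∀ (A : List Int), Dom_perfectPeak A → Pre_perfectPeak A → Spec_perfectPeak A (perfectPeak A)

-- ===== LEMMAS AND PROOFS =====

-- prefix maximum: pvPmax A k = max(A[0..k])
def pvPmax (A : List Int) : Nat → Int
  | 0 => A.getD 0 0
  | k + 1 => max (pvPmax A k) (A.getD (k + 1) 0)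

-- suffix minimum with fuel: pvSminF A d i = min(A[i..i+d])
def pvSminF (A : List Int) : Nat → Nat → Int
  | 0, i => A.getD i 0
  | d + 1, i => min (A.getD i 0) (pvSminF A d (i + 1))

-- i is a "surviving left-peak" at time j: greater than everything before it
-- and smaller than everything after it up to index j
def pvSurv (A : List Int) (j i : Nat) : Prop :=
  1 ≤ i ∧ pvPmax A (i - 1) < A.getD i 0 ∧ ∀ t, i < t → t ≤ j → A.getD i 0 < A.getD t 0

-- loop invariant of B after processing indices 1..j
def pvInv (A : List Int) (j : Nat) (st : Int × Option Int) : Prop :=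
  st.1 = pvPmax A j ∧
  match st.2 with
  | none => ∀ i, i ≤ j → ¬ pvSurv A j i
  | some c => (∃ i, i ≤ j ∧ pvSurv A j i ∧ c = A.getD i 0) ∧
              (∀ i, i ≤ j → pvSurv A j i → c ≤ A.getD i 0)

lemma getD_le_pvPmax (A : List Int) : ∀ j i : Nat, i ≤ j → A.getD i 0 ≤ pvPmax A j := by
  intro j
  induction j with
  | zero => intro i hi; interval_cases i; simp [pvPmax]
  | succ j ih =>
    intro i hi
    rcases Nat.lt_or_ge i (j + 1) with h | h
    · exact le_trans (ih i (by omega)) (le_max_left _ _)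
    · have : i = j + 1 := by omega
      subst this; exact le_max_right _ _

lemma pvSurv_succ_iff (A : List Int) (j i : Nat) (hij : i ≤ j) :
    pvSurv A (j + 1) i ↔ pvSurv A j i ∧ A.getD i 0 < A.getD (j + 1) 0 := by
  unfold pvSurv
  constructor
  · rintro ⟨h1, h2, h3⟩
    exact ⟨⟨h1, h2, fun t ht1 ht2 => h3 t ht1 (by omega)⟩, h3 (j + 1) (by omega) le_rfl⟩
  · rintro ⟨⟨h1, h2, h3⟩, h4⟩
    refine ⟨h1, h2, fun t ht1 ht2 => ?_⟩
    by_cases ht : t ≤ j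
    · exact h3 t ht1 ht
    · have : t = j + 1 := by omega
      subst this; exact h4

lemma pvSurv_last_iff (A : List Int) (j : Nat) :
    pvSurv A (j + 1) (j + 1) ↔ pvPmax A j < A.getD (j + 1) 0 := by
  unfold pvSurv
  constructor
  · rintro ⟨_, h2, _⟩
    simpa using h2
  · intro h
    exact ⟨by omega, by simpa using h, fun t ht1 ht2 => absurd (by omega : ¬ (j + 1 < t ∧ t ≤ j + 1)) (by exact fun hc => hc ⟨ht1, ht2⟩)⟩

lemma pvInv_step (A : List Int) (j : Nat) (st : Int × Option Int) (h : pvInv A j st) :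
    pvInv A (j + 1) (pvStepB A st ((j : Int) + 1)) := by
  obtain ⟨rm, cand⟩ := st
  obtain ⟨h1, h2⟩ := h
  simp only at h1
  have hx : PySem.List.pyGetD A ((j : Int) + 1) 0 = A.getD (j + 1) 0 := by
    rw [show ((j : Int) + 1) = (((j + 1 : Nat) : Int)) from by push_cast; ring,
      PySem.List.pyGetD_natCast]
  cases cand with
  | none =>
    simp only at h2
    simp only [pvStepB, hx]
    constructor
    · simp [h1, pvPmax]
    · split_ifs with hlt
      · -- new candidate A[j+1]
        simp only
        constructor
        · exact ⟨j + 1, le_rfl, (pvSurv_last_iff A j).mpr (h1 ▸ hlt), rfl⟩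
        · intro i hi hs
          by_cases hij : i ≤ j
          · exact absurd (((pvSurv_succ_iff A j i hij).mp hs).1) (h2 i hij)
          · have : i = j + 1 := by omega
            subst this; exact le_rfl
      · simp only
        intro i hi hs
        by_cases hij : i ≤ j
        · exact absurd (((pvSurv_succ_iff A j i hij).mp hs).1) (h2 i hij)
        · have : i = j + 1 := by omega
          subst this
          exact hlt (h1 ▸ (pvSurv_last_iff A j).mp hs)
  | some c =>
    simp only at h2
    obtain ⟨⟨iw, hiw, hsw, hcw⟩, hmin⟩ := h2
    have hcle : c ≤ pvPmax A j := hcw ▸ getD_le_pvPmax A j iw hiw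
    simp only [pvStepB, hx]
    constructor
    · simp [h1, pvPmax]
    · by_cases hle : A.getD (j + 1) 0 ≤ c
      · rw [if_pos hle]
        split_ifs with hlt
        · -- x ≤ c : candidate dies; and x ≤ c ≤ pmax j = rm so no rebirth
          exact absurd (h1 ▸ lt_of_lt_of_le hlt (le_trans hle hcle)) (lt_irrefl _)
        · simp only
          intro i hi hs
          by_cases hij : i ≤ j
          · obtain ⟨hs', hlast⟩ := (pvSurv_succ_iff A j i hij).mp hs
            exact absurd (lt_of_le_of_lt (le_trans hle (hmin i hij hs')) hlast) (lt_irrefl _)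
          · have : i = j + 1 := by omega
            subst this
            exact absurd (lt_of_le_of_lt (le_trans hle hcle) ((pvSurv_last_iff A j).mp hs)) (lt_irrefl _)
      · -- c < x : candidate survives
        rw [if_neg hle]
        dsimp only
        have hle : c < A.getD (j + 1) 0 := lt_of_not_ge hle
        constructor
        · exact ⟨iw, by omega, (pvSurv_succ_iff A j iw hiw).mpr ⟨hsw, hcw ▸ hle⟩, hcw⟩
        · intro i hi hs
          by_cases hij : i ≤ j
          · exact hmin i hij ((pvSurv_succ_iff A j i hij).mp hs).1
          · have : i = j + 1 := by omega
            subst this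
            exact le_of_lt hle

lemma pvInv_fold (A : List Int) : ∀ (m j : Nat) (st : Int × Option Int), pvInv A j st →
    pvInv A (j + m) ((PySem.List.pyRange ((j : Int) + 1) ((j : Int) + 1 + (m : Int)) 1).foldl (pvStepB A) st) := by
  intro m
  induction m with
  | zero =>
    intro j st h
    simp only [Nat.cast_zero, add_zero]
    rw [PySem.List.pyRange_one_eq_nil le_rfl]
    exact h
  | succ m ih =>
    intro j st h
    rw [PySem.List.pyRange_one_cons (by push_cast; omega)]
    simp only [List.foldl_cons]
    have h2 := ih (j + 1) (pvStepB A st ((j : Int) + 1)) (pvInv_step A j st h)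
    rw [show j + (m + 1) = (j + 1) + m from by omega]
    have heq : PySem.List.pyRange ((j : Int) + 1 + 1) ((j : Int) + 1 + ((m : Int) + 1)) 1
        = PySem.List.pyRange (((j + 1 : Nat) : Int) + 1) (((j + 1 : Nat) : Int) + 1 + (m : Int)) 1 := by
      push_cast; ring_nf
    rw [show ((m + 1 : Nat) : Int) = (m : Int) + 1 from by push_cast; ring, heq]
    exact h2

lemma maxi_eq (A : List Int) (k : Nat) :
    (PySem.List.pyRange 1 ((k : Int) + 1) 1).foldl
      (fun m i => m ++ [max (PySem.List.pyGetD m (i - 1) 0) (PySem.List.pyGetD A i 0)])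
      [PySem.List.pyGetD A 0 0]
    = (List.range (k + 1)).map (pvPmax A) := by
  induction k with
  | zero => simp [PySem.List.pyRange_one_eq_nil, pvPmax, PySem.List.pyGetD_ofNat']
  | succ k ih =>
    rw [show (((k + 1 : Nat) : Int) + 1) = (((k : Int) + 1) + 1) from by push_cast; ring,
       PySem.List.pyRange_one_succ_right (by omega)]
    rw [List.foldl_append, ih]
    simp only [List.foldl]
    have hget : PySem.List.pyGetD ((List.range (k + 1)).map (pvPmax A)) ((k : Int) + 1 - 1) 0
        = pvPmax A k := by
      have h1 : ((k : Int) + 1 - 1) = ((k : Nat) : Int) := by omega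
      rw [h1, PySem.List.pyGetD_natCast]
      simp [List.getD]
    have hgetA : PySem.List.pyGetD A ((k : Int) + 1) 0 = A.getD (k + 1) 0 := by
      rw [show ((k : Int) + 1) = (((k + 1 : Nat) : Int)) from by push_cast; ring,
        PySem.List.pyGetD_natCast]
    rw [hget, hgetA]
    rw [List.range_succ (n := k + 1), List.map_append]
    rfl

lemma pyGetD_zero_cons (x : Int) (l : List Int) : PySem.List.pyGetD (x :: l) 0 0 = x := by
  rw [show (0 : Int) = ((0 : Nat) : Int) from by norm_num, PySem.List.pyGetD_natCast]
  rfl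

lemma mini_acc_cons (A : List Int) (k jj : Nat) (hjj : jj ≤ k) :
    (List.range (k + 1 - jj)).map (fun t => pvSminF A (k - (jj + t)) (jj + t))
    = pvSminF A (k - jj) jj ::
      (List.range (k + 1 - (jj + 1))).map (fun t => pvSminF A (k - (jj + 1 + t)) (jj + 1 + t)) := by
  rw [show k + 1 - jj = (k + 1 - (jj + 1)) + 1 from by omega, List.range_succ_eq_map,
    List.map_cons, List.map_map]
  simp only [Nat.add_zero]
  congr 1
  congr 1
  funext t
  simp only [Function.comp_apply, Nat.succ_eq_add_one]
  rw [show jj + (t + 1) = jj + 1 + t from by omega]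

lemma mini_eq (A : List Int) (k : Nat) :
    (PySem.List.pyRange ((k : Int) - 1) (-1) (-1)).foldl
      (fun m i => (min (PySem.List.pyGetD m 0 0) (PySem.List.pyGetD A i 0)) :: m)
      [PySem.List.pyGetD A (k : Int) 0]
    = (List.range (k + 1)).map (fun i => pvSminF A (k - i) i) := by
  have main : ∀ j : Nat, j ≤ k →
      (PySem.List.pyRange ((j : Int) - 1) (-1) (-1)).foldl
        (fun m i => (min (PySem.List.pyGetD m 0 0) (PySem.List.pyGetD A i 0)) :: m)
        ((List.range (k + 1 - j)).map (fun t => pvSminF A (k - (j + t)) (j + t)))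
      = (List.range (k + 1)).map (fun i => pvSminF A (k - i) i) := by
    intro j
    induction j with
    | zero =>
      intro _
      rw [show ((0 : Nat) : Int) - 1 = -1 from by norm_num, PySem.List.pyRange_neg_one_eq_nil le_rfl]
      simp
    | succ j ih =>
      intro hj
      rw [show (((j + 1 : Nat)) : Int) - 1 = (j : Int) from by push_cast; ring,
        PySem.List.pyRange_neg_one_cons (by omega)]
      simp only [List.foldl_cons]
      rw [mini_acc_cons A k (j + 1) hj, pyGetD_zero_cons, PySem.List.pyGetD_natCast A j 0]
      have hmin : min (pvSminF A (k - (j + 1)) (j + 1)) (A.getD j 0) = pvSminF A (k - j) j := by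
        rw [show k - j = (k - (j + 1)) + 1 from by omega]
        simp [pvSminF, min_comm]
      rw [hmin, ← mini_acc_cons A k (j + 1) hj, ← mini_acc_cons A k j (by omega)]
      exact ih (by omega)
  have h0 := main k le_rfl
  rw [show k + 1 - k = 1 from by omega] at h0
  simp only [List.range_one, List.map_cons, List.map_nil, Nat.add_zero, Nat.sub_self] at h0
  rw [show (PySem.List.pyGetD A (k : Int) 0) = A.getD k 0 from PySem.List.pyGetD_natCast A k 0]
  exact (by simpa [pvSminF] using h0)

lemma lt_pvSminF (A : List Int) (x : Int) : ∀ (d i : Nat),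
    (x < pvSminF A d i ↔ ∀ t, i ≤ t → t ≤ i + d → x < A.getD t 0) := by
  intro d
  induction d with
  | zero =>
    intro i
    simp only [pvSminF, Nat.add_zero]
    constructor
    · intro h t h1 h2; have : t = i := by omega
      subst this; exact h
    · intro h; exact h i le_rfl le_rfl
  | succ d ih =>
    intro i
    simp only [pvSminF, lt_min_iff, ih (i + 1)]
    constructor
    · rintro ⟨h0, h⟩ t h1 h2
      rcases Nat.eq_or_lt_of_le h1 with rfl | hlt
      · exact h0
      · exact h t hlt (by omega)
    · intro h
      exact ⟨h i le_rfl (by omega), fun t h1 h2 => h t (by omega) (by omega)⟩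

lemma scanA_eq (A maxi mini : List Int) : ∀ (l : List Int),
    pvScanA A maxi mini l =
      if ∃ i ∈ l, PySem.List.pyGetD maxi (i - 1) 0 < PySem.List.pyGetD A i 0 ∧
                  PySem.List.pyGetD A i 0 < PySem.List.pyGetD mini (i + 1) 0
      then 1 else 0 := by
  intro l
  induction l with
  | nil => simp [pvScanA]
  | cons i rest ih =>
    simp only [pvScanA, ih]
    by_cases h : PySem.List.pyGetD maxi (i - 1) 0 < PySem.List.pyGetD A i 0 ∧
        PySem.List.pyGetD A i 0 < PySem.List.pyGetD mini (i + 1) 0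
    · rw [if_pos h, if_pos ⟨i, List.mem_cons_self, h⟩]
    · rw [if_neg h]
      by_cases h2 : ∃ t ∈ rest, PySem.List.pyGetD maxi (t - 1) 0 < PySem.List.pyGetD A t 0 ∧
          PySem.List.pyGetD A t 0 < PySem.List.pyGetD mini (t + 1) 0
      · obtain ⟨t, ht, hc⟩ := h2
        rw [if_pos ⟨t, ht, hc⟩, if_pos ⟨t, List.mem_cons_of_mem _ ht, hc⟩]
      · rw [if_neg h2, if_neg ?_]
        rintro ⟨t, ht, hc⟩
        rcases List.mem_cons.mp ht with rfl | ht'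
        · exact h hc
        · exact h2 ⟨t, ht', hc⟩

lemma getD_map_range_int (f : Nat → Int) (n t : Nat) (h : t < n) :
    ((List.range n).map f).getD t 0 = f t := by
  rw [List.getD_eq_getElem?_getD]
  simp [h]

-- the cell-wise test of A's third loop, in Nat form, is exactly "survivor + below the last element"
lemma cond_iff (A : List Int) (m i' : Nat) (h1 : 1 ≤ i') (h2 : i' ≤ m) :
    (pvPmax A (i' - 1) < A.getD i' 0 ∧ A.getD i' 0 < pvSminF A (m - i') (i' + 1))
    ↔ (pvSurv A m i' ∧ A.getD i' 0 < A.getD (m + 1) 0) := by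
  rw [lt_pvSminF]
  unfold pvSurv
  constructor
  · rintro ⟨hp, hs⟩
    exact ⟨⟨h1, hp, fun t ht1 ht2 => hs t (by omega) (by omega)⟩, hs (m + 1) (by omega) (by omega)⟩
  · rintro ⟨⟨_, hp, hall⟩, hlast⟩
    refine ⟨hp, fun t ht1 ht2 => ?_⟩
    by_cases ht : t ≤ m
    · exact hall t (by omega) ht
    · have : t = m + 1 := by omega
      subst this; exact hlast

-- ===== VERDICT (by name: the statement is the Claim_ definition above) =====
theorem perfectPeak_spec : Claim_equal_perfectPeak := by
  intro A _ hpre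
  unfold Spec_perfectPeak perfectPeak perfectPeak_alt
  obtain ⟨k, hk⟩ : ∃ k, A.length = k + 1 := ⟨A.length - 1, by
    have : A.length ≠ 0 := fun h => hpre (List.eq_nil_of_length_eq_zero h)
    omega⟩
  have hn : (A.length : Int) = (k : Int) + 1 := by rw [hk]; push_cast; ring
  simp only [hn]
  rw [show ((k : Int) + 1 - 2) = (k : Int) - 1 from by ring,
    show ((k : Int) + 1 - 1) = (k : Int) from by ring]
  rw [maxi_eq A k, mini_eq A k, scanA_eq]
  cases k with
  | zero =>
    rw [PySem.List.pyRange_one_eq_nil (by norm_num)]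
    simp
  | succ m =>
    rw [show ((m + 1 : Nat) : Int) = (m : Int) + 1 from by push_cast; ring]
    -- B side: the loop invariant after processing indices 1..m
    have hInit : pvInv A 0 ((PySem.List.pyGetD A 0 0), none) := by
      constructor
      · simp only [pvPmax]
        rw [show (0 : Int) = ((0 : Nat) : Int) from by norm_num, PySem.List.pyGetD_natCast]
      · intro i hi hs
        have := hs.1
        omega
    have hInv := pvInv_fold A m 0 (PySem.List.pyGetD A 0 0, none) hInit
    rw [show ((0 : Nat) : Int) + 1 = 1 from by norm_num,
      show (1 : Int) + (m : Int) = (m : Int) + 1 from by ring] at hInv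
    rw [show (0 : Nat) + m = m from by omega] at hInv
    obtain ⟨hrm, hcand⟩ := hInv
    have hlast : PySem.List.pyGetD A ((m : Int) + 1) 0 = A.getD (m + 1) 0 := by
      rw [show ((m : Int) + 1) = (((m + 1 : Nat)) : Int) from by push_cast; ring,
        PySem.List.pyGetD_natCast]
    -- A side: the existential over the scanned range in Nat form
    have hEx : (∃ i ∈ PySem.List.pyRange 1 ((m : Int) + 1) 1,
        PySem.List.pyGetD ((List.range (m + 1 + 1)).map (pvPmax A)) (i - 1) 0 < PySem.List.pyGetD A i 0 ∧
        PySem.List.pyGetD A i 0 <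
          PySem.List.pyGetD ((List.range (m + 1 + 1)).map (fun i => pvSminF A (m + 1 - i) i)) (i + 1) 0)
        ↔ (∃ i' : Nat, 1 ≤ i' ∧ i' ≤ m ∧ pvSurv A m i' ∧ A.getD i' 0 < A.getD (m + 1) 0) := by
      constructor
      · rintro ⟨i, hmem, hc⟩
        obtain ⟨hge, hlt⟩ := PySem.List.mem_pyRange_one.mp hmem
        refine ⟨i.toNat, by omega, by omega, ?_⟩
        rw [show i - 1 = ((i.toNat - 1 : Nat) : Int) from by omega, PySem.List.pyGetD_natCast,
          show i + 1 = ((i.toNat + 1 : Nat) : Int) from by omega, PySem.List.pyGetD_natCast,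
          show i = ((i.toNat : Nat) : Int) from by omega, PySem.List.pyGetD_natCast,
          getD_map_range_int _ _ _ (by omega), getD_map_range_int _ _ _ (by omega)] at hc
        simp only [Int.toNat_natCast] at hc
        rw [show m + 1 - (i.toNat + 1) = m - i.toNat from by omega] at hc
        exact (cond_iff A m i.toNat (by omega) (by omega)).mp hc
      · rintro ⟨i', h1, h2, hc⟩
        refine ⟨(i' : Int), PySem.List.mem_pyRange_one.mpr ⟨by omega, by omega⟩, ?_⟩
        rw [show ((i' : Int)) - 1 = ((i' - 1 : Nat) : Int) from by omega, PySem.List.pyGetD_natCast,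
          show ((i' : Int)) + 1 = ((i' + 1 : Nat) : Int) from by omega, PySem.List.pyGetD_natCast,
          PySem.List.pyGetD_natCast,
          getD_map_range_int _ _ _ (by omega), getD_map_range_int _ _ _ (by omega)]
        rw [show m + 1 - (i' + 1) = m - i' from by omega]
        exact (cond_iff A m i' h1 h2).mpr hc
    -- case split on the final candidate
    cases hc : ((PySem.List.pyRange 1 ((m : Int) + 1) 1).foldl (pvStepB A)
        (PySem.List.pyGetD A 0 0, none)).2 with
    | none =>
      rw [hc] at hcand
      dsimp only
      rw [if_neg]
      intro hx
      obtain ⟨i', _, h2, hs, _⟩ := hEx.mp hx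
      exact hcand i' h2 hs
    | some c =>
      rw [hc] at hcand
      obtain ⟨⟨iw, hiw, hsw, hcw⟩, hmin⟩ := hcand
      dsimp only
      rw [hlast]
      by_cases hcx : c < A.getD (m + 1) 0
      · rw [if_pos hcx, if_pos (hEx.mpr ⟨iw, hsw.1, hiw, hsw, by rw [← hcw]; exact hcx⟩)]
      · rw [if_neg hcx, if_neg]
        intro hx
        obtain ⟨i', _, h2, hs, hlt2⟩ := hEx.mp hx
        exact hcx (lt_of_le_of_lt (hmin i' h2 hs) hlt2)
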